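-- pv_equiv track=rewrite | github.com/ji-hyeon97/PS-Exercise | 프로그래머스/lv2/76502. 괄호 회전하기/괄호 회전하기.py | solution
-- ===== SOURCE A (Python) =====
-- def solution(s):
--     answer = 0
--     for i in range(len(s)):
--         stack = []
--         data = s[i:] + s[:i]
--         for i in data:
--             if i == '(' or i=='{' or i=='[':
--                 stack.append(i)
--             if i == ')':
--                 if stack and stack[-1] == '(':
--                     stack.pop()
--                 else:
--                     stack.append(i)
--             if i == '}':
--                 if stack and stack[-1] == '{':
--                     stack.pop()
--                 else:
--                     stack.append(i)
--             if i == ']':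
--                 if stack and stack[-1] == '[':
--                     stack.pop()
--                 else:
--                     stack.append(i)
--         if len(stack) == 0:
--             answer+=1
--     return answer
-- ===== SOURCE B (Python) =====
-- BRACKETS = ('(', ')', '{', '}', '[', ']')
--
-- def _one_pass(b):
--     # one left-to-right sweep removing disjoint adjacent matched pairs
--     out = []
--     j = 0
--     while j < len(b):
--         if j + 1 < len(b) and (b[j], b[j + 1]) in (('(', ')'), ('{', '}'), ('[', ']')):
--             j += 2
--         else:
--             out.append(b[j])
--             j += 1
--     return out
--
-- def solution(s):
--     n = len(s)
--     d = s + s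
--     answer = 0
--     for i in range(n):
--         b = [c for c in d[i:i + n] if c in BRACKETS]
--         while True:
--             u = _one_pass(b)
--             if len(u) == len(b):
--                 break
--             b = u
--         if not b:
--             answer += 1
--     return answer
-- ===== Notes on version B (the rewrite author's own statement) =====
-- stated objective: alternative
-- what changed: Validity of each rotation is decided by repeatedly sweeping the bracket-filtered string and deleting disjoint adjacent matched pairs until a fixpoint, instead of A's push/pop stack scan; rotations are taken as windows of the doubled string rather than two slices.
import Mathlib
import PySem

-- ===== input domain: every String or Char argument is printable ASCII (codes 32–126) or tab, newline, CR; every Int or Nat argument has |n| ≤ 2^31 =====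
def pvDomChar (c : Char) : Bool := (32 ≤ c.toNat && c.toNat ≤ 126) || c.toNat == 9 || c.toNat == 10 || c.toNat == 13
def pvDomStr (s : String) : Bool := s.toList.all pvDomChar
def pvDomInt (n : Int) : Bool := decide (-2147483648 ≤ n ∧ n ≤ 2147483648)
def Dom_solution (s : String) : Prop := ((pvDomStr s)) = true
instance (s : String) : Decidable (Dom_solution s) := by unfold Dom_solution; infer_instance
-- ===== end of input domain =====

-- B decides each rotation's validity by iterated deletion of disjoint adjacent matched pairs
-- on the bracket-filtered window of the doubled string, instead of A's push/pop stack scan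
-- (objective: alternative decomposition, similar cost).

-- ===== PORT A =====
-- body of A's inner loop: the four successive `if` statements on the stack
def stepA (stack : List Char) (c : Char) : List Char :=
  let s1 := if c = '(' ∨ c = '{' ∨ c = '[' then stack ++ [c] else stack
  let s2 := if c = ')' then
      (if s1 ≠ [] ∧ s1.getLast? = some '(' then s1.dropLast else s1 ++ [c]) else s1
  let s3 := if c = '}' then
      (if s2 ≠ [] ∧ s2.getLast? = some '{' then s2.dropLast else s2 ++ [c]) else s2
  if c = ']' then
      (if s3 ≠ [] ∧ s3.getLast? = some '[' then s3.dropLast else s3 ++ [c]) else s3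

-- string slicing and concatenation are ported on the code-point list (exact for str)
def solution (s : String) : Int :=
  let cs := s.toList
  (PySem.List.pyRange 0 (cs.length : Int) 1).foldl (fun answer i =>
    let data := PySem.List.slice cs (some i) none ++ PySem.List.slice cs none (some i)
    let stack := data.foldl stepA []
    if stack.length = 0 then answer + 1 else answer) 0

-- ===== PORT B =====
def pvBrackets : List Char := ['(', ')', '{', '}', '[', ']']

-- Source B's pair test (b[j], b[j+1]) in (('(',')'), ('{','}'), ('[',']'))
def pairB (x y : Char) : Bool :=
  (x = '(' && y = ')') || (x = '{' && y = '}') || (x = '[' && y = ']')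

-- Source B's _one_pass: one left-to-right sweep removing disjoint adjacent matched pairs
def onePass : List Char → List Char
  | x :: y :: rest => if pairB x y then onePass rest else x :: onePass (y :: rest)
  | l => l

-- cited by reduceB's decreasing_by (a sweep never lengthens the list)
theorem onePass_length_le : ∀ b : List Char, (onePass b).length ≤ b.length
  | [] => by simp [onePass]
  | [x] => by simp [onePass]
  | x :: y :: rest => by
    simp only [onePass]
    split
    · have := onePass_length_le rest; simp; omega
    · have := onePass_length_le (y :: rest); simp at this ⊢; omega

-- Source B's `while True` fixpoint loop
def reduceB (b : List Char) : List Char :=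
  let u := onePass b
  if u.length = b.length then b else reduceB u
termination_by b.length
decreasing_by
  have h := onePass_length_le b
  simp only [u] at *
  omega

def solution_alt (s : String) : Int :=
  let n := s.toList.length
  let d := s.toList ++ s.toList
  (PySem.List.pyRange 0 (n : Int) 1).foldl (fun answer i =>
    let b := (PySem.List.slice d (some i) (some (i + (n : Int)))).filter
      (fun c => decide (c ∈ pvBrackets))
    let r := reduceB b
    if r = [] then answer + 1 else answer) 0

-- ===== PRECONDITION & SPEC =====
def Spec_solution (s : String) (out : Int) : Prop := out = solution_alt s
instance (s : String) (out : Int) : Decidable (Spec_solution s out) := by unfold Spec_solution; infer_instance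

-- ===== CLAIM (what is proved, stated in full; the proofs are below) =====
def Claim_equal_solution : Prop := ∀ (s : String), Dom_solution s → Spec_solution s (solution s)

-- ===== LEMMAS AND PROOFS =====

-- character classes used only by the proofs
def isOpenC (c : Char) : Bool := c = '(' || c = '{' || c = '['
def isCloseC (c : Char) : Bool := c = ')' || c = '}' || c = ']'

theorem stepA_open {c : Char} (hc : isOpenC c = true) (st : List Char) :
    stepA st c = st ++ [c] := by
  simp only [isOpenC, Bool.or_eq_true, decide_eq_true_eq] at hc
  rcases hc with (h | h) | h <;> subst h <;> simp [stepA]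

theorem stepA_nonbr {c : Char} (hc : ¬ c ∈ pvBrackets) (st : List Char) :
    stepA st c = st := by
  simp only [pvBrackets, List.mem_cons, List.not_mem_nil, or_false, not_or] at hc
  obtain ⟨h1, h2, h3, h4, h5, h6⟩ := hc
  simp [stepA, h1, h2, h3, h4, h5, h6]

theorem run_filter (t : List Char) (st : List Char) :
    (t.filter (fun c => decide (c ∈ pvBrackets))).foldl stepA st = t.foldl stepA st := by
  rw [List.foldl_filter]
  apply PySem.List.foldl_congr_mem
  intro acc x _
  by_cases h : x ∈ pvBrackets
  · simp [h]
  · simp [h, stepA_nonbr h]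

theorem stepA_pair {x y : Char} (h : pairB x y = true) (st : List Char) :
    stepA (stepA st x) y = st := by
  simp only [pairB, Bool.or_eq_true, Bool.and_eq_true, decide_eq_true_eq] at h
  rcases h with (⟨hx, hy⟩ | ⟨hx, hy⟩) | ⟨hx, hy⟩ <;> subst hx <;> subst hy <;>
    simp [stepA]

theorem run_onePass (b : List Char) : ∀ st : List Char,
    (onePass b).foldl stepA st = b.foldl stepA st := by
  induction b using onePass.induct with
  | case1 x y rest hp ih =>
    intro st
    simp only [onePass, if_pos hp, List.foldl_cons, stepA_pair hp]
    exact ih st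
  | case2 x y rest hp ih =>
    intro st
    simp only [onePass, if_neg hp, List.foldl_cons]
    exact ih (stepA st x)
  | case3 l hno =>
    intro st
    rcases l with _ | ⟨x, _ | ⟨y, rest⟩⟩
    · rfl
    · rfl
    · exact absurd rfl (fun h => hno x y rest h)

theorem mem_onePass {x : Char} : ∀ {b : List Char}, x ∈ onePass b → x ∈ b := by
  intro b
  induction b using onePass.induct with
  | case1 a y rest hp ih =>
    intro h
    simp only [onePass, if_pos hp] at h
    exact List.mem_cons_of_mem _ (List.mem_cons_of_mem _ (ih h))
  | case2 a y rest hp ih =>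
    intro h
    simp only [onePass, if_neg hp, List.mem_cons] at h
    rcases h with h | h
    · simp [h]
    · exact List.mem_cons_of_mem _ (ih h)
  | case3 l hno =>
    rcases l with _ | ⟨x, _ | ⟨y, rest⟩⟩
    · exact id
    · exact id
    · exact absurd rfl (fun h => hno x y rest h)

theorem onePass_of_length_eq : ∀ {b : List Char}, (onePass b).length = b.length → onePass b = b := by
  intro b
  induction b using onePass.induct with
  | case1 x y rest hp ih =>
    intro h
    exfalso
    have := onePass_length_le rest
    simp only [onePass, if_pos hp, List.length_cons] at h
    omega
  | case2 x y rest hp ih =>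
    intro h
    simp only [onePass, if_neg hp, List.length_cons] at h ⊢
    have : onePass (y :: rest) = y :: rest := ih (by simpa using h)
    rw [this]
  | case3 l hno =>
    intro _
    rcases l with _ | ⟨x, _ | ⟨y, rest⟩⟩
    · rfl
    · rfl
    · exact absurd rfl (fun h => hno x y rest h)

theorem reduceB_eq_pos {b : List Char} (h : (onePass b).length = b.length) : reduceB b = b := by
  rw [reduceB]; exact if_pos h

theorem reduceB_eq_neg {b : List Char} (h : ¬(onePass b).length = b.length) :
    reduceB b = reduceB (onePass b) := by
  rw [reduceB]; exact if_neg h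

theorem run_reduceB (b : List Char) : ∀ st : List Char,
    (reduceB b).foldl stepA st = b.foldl stepA st := by
  induction b using reduceB.induct with
  | case1 b u h =>
    intro st
    rw [reduceB_eq_pos h]
  | case2 b u h ih =>
    intro st
    rw [reduceB_eq_neg h, ih st, run_onePass]

theorem reduceB_fix (b : List Char) : onePass (reduceB b) = reduceB b := by
  induction b using reduceB.induct with
  | case1 b u h =>
    rw [reduceB_eq_pos h]
    exact onePass_of_length_eq h
  | case2 b u h ih =>
    rw [reduceB_eq_neg h]
    exact ih

theorem mem_reduceB {x : Char} : ∀ {b : List Char}, x ∈ reduceB b → x ∈ b := by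
  intro b
  induction b using reduceB.induct with
  | case1 b u h =>
    rw [reduceB_eq_pos h]
    exact id
  | case2 b u h ih =>
    rw [reduceB_eq_neg h]
    intro hm
    exact mem_onePass (ih hm)

theorem fix_tail {a : Char} {l : List Char} (hne : l ≠ [])
    (h : onePass (a :: l) = a :: l) : onePass l = l := by
  obtain ⟨b, l', rfl⟩ := List.exists_cons_of_ne_nil hne
  by_cases hp : pairB a b = true
  · exfalso
    simp only [onePass, if_pos hp] at h
    have := onePass_length_le l'
    have := congrArg List.length h
    simp at this
    omega
  · simp only [onePass, if_neg hp, List.cons.injEq] at h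
    exact h.2

theorem pair_not_in_fix : ∀ (u : List Char) {x y : Char} (v : List Char),
    onePass (u ++ x :: y :: v) = u ++ x :: y :: v → pairB x y = false := by
  intro u
  induction u with
  | nil =>
    intro x y v h
    by_cases hp : pairB x y = true
    · exfalso
      simp only [List.nil_append, onePass, if_pos hp] at h
      have := onePass_length_le v
      have := congrArg List.length h
      simp at this
      omega
    · simpa using hp
  | cons a u ih =>
    intro x y v h
    have hne : u ++ x :: y :: v ≠ [] := by simp
    exact ih v (fix_tail hne (by simpa using h))

theorem run_openers : ∀ (o : List Char), (∀ c ∈ o, isOpenC c = true) →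
    ∀ st : List Char, o.foldl stepA st = st ++ o := by
  intro o
  induction o with
  | nil => intro _ st; simp
  | cons c o ih =>
    intro ho st
    simp only [List.foldl_cons, stepA_open (ho c List.mem_cons_self)]
    rw [ih (fun d hd => ho d (List.mem_cons_of_mem _ hd)) (st ++ [c])]
    simp

theorem stepA_rpar (st : List Char) :
    stepA st ')' = if st ≠ [] ∧ st.getLast? = some '(' then st.dropLast else st ++ [')'] := by
  simp [stepA]

theorem stepA_rbrace (st : List Char) :
    stepA st '}' = if st ≠ [] ∧ st.getLast? = some '{' then st.dropLast else st ++ ['}'] := by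
  simp [stepA]

theorem stepA_rbrack (st : List Char) :
    stepA st ']' = if st ≠ [] ∧ st.getLast? = some '[' then st.dropLast else st ++ [']'] := by
  simp [stepA]

theorem mem_stepA {d : Char} (hd : isCloseC d = true) {st : List Char} (h : d ∈ st)
    (c : Char) : d ∈ stepA st c := by
  have hd' : d = ')' ∨ d = '}' ∨ d = ']' := by
    simp only [isCloseC, Bool.or_eq_true, decide_eq_true_eq] at hd
    tauto
  by_cases ho : isOpenC c = true
  · rw [stepA_open ho]; exact List.mem_append_left _ h
  by_cases hbr : c ∈ pvBrackets
  · have hc : c = ')' ∨ c = '}' ∨ c = ']' := by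
      simp only [pvBrackets, List.mem_cons, List.not_mem_nil, or_false] at hbr
      simp only [isOpenC, Bool.or_eq_true, decide_eq_true_eq, not_or] at ho
      tauto
    have key : ∀ (m : Char), st.getLast? = some m → d ≠ m → d ∈ st.dropLast := by
      intro m hm hdm
      have hst := List.dropLast_append_getLast? m hm
      rw [← hst] at h
      rcases List.mem_append.mp h with h' | h'
      · exact h'
      · simp at h'; exact absurd h' hdm
    rcases hc with rfl | rfl | rfl
    · rw [stepA_rpar]
      split_ifs with hcond
      · exact key '(' hcond.2 (by rcases hd' with rfl | rfl | rfl <;> decide)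
      · exact List.mem_append_left _ h
    · rw [stepA_rbrace]
      split_ifs with hcond
      · exact key '{' hcond.2 (by rcases hd' with rfl | rfl | rfl <;> decide)
      · exact List.mem_append_left _ h
    · rw [stepA_rbrack]
      split_ifs with hcond
      · exact key '[' hcond.2 (by rcases hd' with rfl | rfl | rfl <;> decide)
      · exact List.mem_append_left _ h
  · rw [stepA_nonbr hbr]; exact h

theorem mem_foldl_close {d : Char} (hd : isCloseC d = true) :
    ∀ (l st : List Char), d ∈ st → d ∈ l.foldl stepA st := by
  intro l
  induction l with
  | nil => intro st h; exact h
  | cons c l ih =>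
    intro st h
    exact ih (stepA st c) (mem_stepA hd h c)

theorem bracket_open_or_close {c : Char} (h : c ∈ pvBrackets) :
    isOpenC c = true ∨ isCloseC c = true := by
  simp only [pvBrackets, List.mem_cons, List.not_mem_nil, or_false] at h
  rcases h with rfl | rfl | rfl | rfl | rfl | rfl <;> simp [isOpenC, isCloseC]

theorem empty_of_fix_valid (w : List Char) (hall : ∀ c ∈ w, c ∈ pvBrackets)
    (hfix : onePass w = w) (hrun : w.foldl stepA [] = []) : w = [] := by
  have hw : w.takeWhile isOpenC ++ w.dropWhile isOpenC = w := List.takeWhile_append_dropWhile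
  have ho : ∀ c ∈ w.takeWhile isOpenC, isOpenC c = true := fun c hc => List.mem_takeWhile_imp hc
  cases hr : w.dropWhile isOpenC with
  | nil =>
    rw [hr] at hw
    simp only [List.append_nil] at hw
    rw [← hw] at hrun
    rw [run_openers _ ho [], List.nil_append] at hrun
    rw [← hw, hrun]
  | cons c r' =>
    exfalso
    -- c is the first non-opener; it is a bracket, hence a closer
    have hcopen : isOpenC c = false := by
      have h2 := List.head?_dropWhile_not isOpenC w
      rw [hr] at h2
      simpa using h2
    have hcw : c ∈ w := by
      rw [← hw, hr]
      exact List.mem_append_right _ List.mem_cons_self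
    have hcclose : isCloseC c = true := by
      rcases bracket_open_or_close (hall c hcw) with h | h
      · rw [h] at hcopen; exact absurd hcopen (by simp)
      · exact h
    set o := w.takeWhile isOpenC with ho_def
    have hrun2 : r'.foldl stepA (stepA o c) = [] := by
      rw [← hw, hr] at hrun
      rw [List.foldl_append, run_openers o ho [], List.nil_append] at hrun
      simpa using hrun
    -- the pop branch contradicts fixpointness; the push branch leaves c in the stack forever
    have hkey : ∀ (m : Char), pairB m c = true → o.getLast? ≠ some m := by
      intro m hm hlast
      have hsplit := List.dropLast_append_getLast? m hlast
      have : onePass (o.dropLast ++ m :: c :: r') = o.dropLast ++ m :: c :: r' := by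
        have : o.dropLast ++ m :: c :: r' = w := by
          rw [← hw, hr, ← hsplit]; simp
        rw [this]; exact hfix
      have := pair_not_in_fix o.dropLast r' this
      rw [hm] at this
      exact absurd this (by simp)
    have hpush : stepA o c = o ++ [c] := by
      have hc3 : c = ')' ∨ c = '}' ∨ c = ']' := by
        simp only [isCloseC, Bool.or_eq_true, decide_eq_true_eq] at hcclose
        tauto
      rcases hc3 with rfl | rfl | rfl
      · rw [stepA_rpar]
        rw [if_neg]
        intro ⟨_, hlast⟩
        exact hkey '(' (by decide) hlast
      · rw [stepA_rbrace]
        rw [if_neg]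
        intro ⟨_, hlast⟩
        exact hkey '{' (by decide) hlast
      · rw [stepA_rbrack]
        rw [if_neg]
        intro ⟨_, hlast⟩
        exact hkey '[' (by decide) hlast
    have : c ∈ ([] : List Char) := by
      rw [← hrun2]
      exact mem_foldl_close hcclose r' _ (by rw [hpush]; exact List.mem_append_right _ List.mem_cons_self)
    simp at this

-- the heart: A's stack scan accepts t iff B's pair-deletion fixpoint on the filtered t is empty
theorem run_iff_reduce (t : List Char) :
    t.foldl stepA [] = [] ↔ reduceB (t.filter (fun c => decide (c ∈ pvBrackets))) = [] := by
  constructor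
  · intro h
    apply empty_of_fix_valid
    · intro c hc
      have := mem_reduceB hc
      have := List.mem_filter.mp this
      simpa using this.2
    · exact reduceB_fix _
    · rw [run_reduceB, run_filter]
      exact h
  · intro h
    have h2 := run_reduceB (t.filter (fun c => decide (c ∈ pvBrackets))) []
    rw [h] at h2
    rw [← run_filter t [], ← h2]
    rfl

theorem rot_eq (cs : List Char) (j : Nat) (hj : j ≤ cs.length) :
    ((cs ++ cs).drop j).take cs.length = cs.drop j ++ cs.take j := by
  rw [List.drop_append_of_le_length hj]
  have h2 : cs.length = (cs.drop j).length + j := by simp; omega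
  rw [h2, List.take_length_add_append]

-- ===== VERDICT (by name: the statement is the Claim_ definition above) =====
theorem solution_spec : Claim_equal_solution := by
  intro s _
  unfold Spec_solution solution solution_alt
  simp only []
  apply Eq.symm
  apply PySem.List.foldl_congr_mem
  intro acc i hi
  rw [PySem.List.mem_pyRange_one] at hi
  obtain ⟨h0, hn⟩ := hi
  lift i to Nat using h0 with j
  have hj : j < s.toList.length := by exact_mod_cast hn
  rw [PySem.List.slice_natCast_add, PySem.List.slice_from_natCast, PySem.List.slice_to_natCast,
    rot_eq s.toList j (le_of_lt hj)]
  simp only [List.length_eq_zero_iff, run_iff_reduce]
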